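-- pv_equiv track=rewrite | github.com/SujinHam/CodingTest_Python | 프로그래머스/0/181890. 왼쪽 오른쪽/왼쪽 오른쪽.py | solution
-- ===== SOURCE A (Python) =====
-- def solution(str_list):
--     answer = []
--     for elem in str_list:
--         if elem == "l":
--             return str_list[:str_list.index("l")]
--         elif elem == "r":
--             return str_list[str_list.index("r")+1:]
--         else:
--             answer = []
--     return answer
-- ===== SOURCE B (Python) =====
-- def solution(str_list):
--     has_l = "l" in str_list
--     has_r = "r" in str_list
--     if has_l and has_r:
--         il = str_list.index("l")
--         ir = str_list.index("r")
--         return str_list[:il] if il < ir else str_list[ir + 1:]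
--     if has_l:
--         return str_list[:str_list.index("l")]
--     if has_r:
--         return str_list[str_list.index("r") + 1:]
--     return []
-- ===== Notes on version B (the rewrite author's own statement) =====
-- stated objective: alternative
-- what changed: B replaces A's element-by-element scan with early returns by an up-front membership/index computation: it tests whether 'l' and 'r' occur, computes both first indices when both occur, and branches on their comparison.
import Mathlib
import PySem

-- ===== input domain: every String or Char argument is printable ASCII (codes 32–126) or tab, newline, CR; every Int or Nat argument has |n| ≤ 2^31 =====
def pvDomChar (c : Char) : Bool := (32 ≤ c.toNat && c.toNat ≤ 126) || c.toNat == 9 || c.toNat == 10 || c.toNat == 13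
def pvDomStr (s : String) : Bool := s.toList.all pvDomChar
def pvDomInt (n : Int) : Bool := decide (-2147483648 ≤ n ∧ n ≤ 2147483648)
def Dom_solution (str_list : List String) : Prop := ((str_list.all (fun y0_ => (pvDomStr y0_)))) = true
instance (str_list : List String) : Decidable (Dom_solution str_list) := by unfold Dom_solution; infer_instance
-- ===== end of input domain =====

-- B computes membership and first indices of "l"/"r" up front and branches on their comparison,
-- instead of A's element-by-element scan with early returns (objective: alternative decomposition).


-- ===== PORT A =====
-- A's for-loop with early returns; `full` is str_list (used for .index and the slices).
-- The '.index' calls are only reached when the element was just seen, so getD 0 is never the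
-- default in any reachable call from `solution`.
def solutionGo (full : List String) : List String → List String
  | [] => []
  | e :: rest =>
    if e = "l" then
      PySem.List.slice full none (some (((PySem.List.index? full "l").getD 0 : Nat) : Int))
    else if e = "r" then
      PySem.List.slice full (some ((((PySem.List.index? full "r").getD 0 : Nat) : Int) + 1)) none
    else
      solutionGo full rest

def solution (str_list : List String) : List String := solutionGo str_list str_list

-- ===== PORT B =====
def solution_alt (str_list : List String) : List String :=
  if "l" ∈ str_list then
    if "r" ∈ str_list then
      match PySem.List.index? str_list "l", PySem.List.index? str_list "r" with
      | some il, some ir => if il < ir then str_list.take il else str_list.drop (ir + 1)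
      | _, _ => []
    else str_list.take ((PySem.List.index? str_list "l").getD 0)
  else if "r" ∈ str_list then
    str_list.drop ((PySem.List.index? str_list "r").getD 0 + 1)
  else []

-- ===== PRECONDITION & SPEC =====
def Spec_solution (str_list : List String) (out : List String) : Prop := out = solution_alt str_list
instance (str_list : List String) (out : List String) : Decidable (Spec_solution str_list out) := by unfold Spec_solution; infer_instance

-- ===== CLAIM (what is proved, stated in full; the proofs are below) =====
def Claim_equal_solution : Prop := ∀ (str_list : List String), Dom_solution str_list → Spec_solution str_list (solution str_list)

-- ===== LEMMAS AND PROOFS =====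

lemma go_none (full : List String) : ∀ rest : List String, "l" ∉ rest → "r" ∉ rest →
    solutionGo full rest = [] := by
  intro rest
  induction rest with
  | nil => intro _ _; rfl
  | cons e rest ih =>
    intro hl hr
    simp only [List.mem_cons, not_or] at hl hr
    have h1 : ¬ e = "l" := fun h => hl.1 h.symm
    have h2 : ¬ e = "r" := fun h => hr.1 h.symm
    simp [solutionGo, h1, h2, ih hl.2 hr.2]

lemma go_l_first (full : List String) :
    ∀ (pre suf : List String), "l" ∉ pre → "r" ∉ pre →
    solutionGo full (pre ++ "l" :: suf)
      = PySem.List.slice full none (some (((PySem.List.index? full "l").getD 0 : Nat) : Int)) := by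
  intro pre
  induction pre with
  | nil => intro suf _ _; simp [solutionGo]
  | cons e pre ih =>
    intro suf hl hr
    simp only [List.mem_cons, not_or] at hl hr
    have h1 : ¬ e = "l" := fun h => hl.1 h.symm
    have h2 : ¬ e = "r" := fun h => hr.1 h.symm
    simp [solutionGo, h1, h2, ih suf hl.2 hr.2]

lemma go_r_first (full : List String) :
    ∀ (pre suf : List String), "l" ∉ pre → "r" ∉ pre →
    solutionGo full (pre ++ "r" :: suf)
      = PySem.List.slice full (some ((((PySem.List.index? full "r").getD 0 : Nat) : Int) + 1)) none := by
  intro pre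
  induction pre with
  | nil => intro suf _ _; simp [solutionGo]
  | cons e pre ih =>
    intro suf hl hr
    simp only [List.mem_cons, not_or] at hl hr
    have h1 : ¬ e = "l" := fun h => hl.1 h.symm
    have h2 : ¬ e = "r" := fun h => hr.1 h.symm
    simp [solutionGo, h1, h2, ih suf hl.2 hr.2]

lemma slice_take (xs : List String) (k : Nat) :
    PySem.List.slice xs none (some ((k : Nat) : Int)) = xs.take k := by
  simpa using PySem.List.slice_to_natCast xs k

lemma slice_drop (xs : List String) (k : Nat) :
    PySem.List.slice xs (some (((k : Nat) : Int) + 1)) none = xs.drop (k + 1) := by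
  have : ((k : Int) + 1) = ((k + 1 : Nat) : Int) := by push_cast; ring
  rw [this, PySem.List.slice_from_natCast]

-- if "r" sits in the prefix before the first "l", then r's index is smaller than l's
lemma idx_lt_of_mem_pre {pre suf : List String} {v w : String} (_hv : v ∉ pre) (hw : w ∈ pre)
    {j : Nat} (hj : PySem.List.index? (pre ++ v :: suf) w = some j) : j < pre.length := by
  rw [PySem.List.index?_append_of_mem _ hw] at hj
  rcases (PySem.List.index?_eq_some_iff _ _ _).1 hj with ⟨p, s, hps, hlen, _⟩
  have : p.length < pre.length := by
    have : pre.length = p.length + 1 + s.length := by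
      rw [hps]; simp; omega
    omega
  omega

theorem solution_eq_alt (full : List String) : solution full = solution_alt full := by
  unfold solution solution_alt
  by_cases hl : "l" ∈ full
  · rcases hlo : PySem.List.index? full "l" with _ | il
    · exact absurd ((PySem.List.index?_eq_none_iff full "l").1 hlo) (not_not_intro hl)
    by_cases hr : "r" ∈ full
    · rcases hro : PySem.List.index? full "r" with _ | ir
      · exact absurd ((PySem.List.index?_eq_none_iff full "r").1 hro) (not_not_intro hr)
      simp only [hl, hr, if_pos]
      rcases (PySem.List.index?_eq_some_iff full "l" il).1 hlo with ⟨preL, sufL, hfl, hlenL, hnotL⟩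
      rcases (PySem.List.index?_eq_some_iff full "r" ir).1 hro with ⟨preR, sufR, hfr, hlenR, hnotR⟩
      by_cases hc : il < ir
      · -- "l" comes first; "r" cannot be in preL
        have hrp : "r" ∉ preL := by
          intro hmem
          have := idx_lt_of_mem_pre hnotL hmem (hfl ▸ hro)
          omega
        rw [if_pos hc]
        have hgo := go_l_first full preL sufL hnotL hrp
        rw [← hfl] at hgo
        rw [hgo, hlo]
        simpa using slice_take full il
      · -- "r" comes first (il ≠ ir since full[il] = "l" ≠ "r" = full[ir])
        have hlp : "l" ∉ preR := by
          intro hmem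
          have := idx_lt_of_mem_pre hnotR hmem (hfr ▸ hlo)
          omega
        rw [if_neg hc]
        have hgo := go_r_first full preR sufR hlp hnotR
        rw [← hfr] at hgo
        rw [hgo, hro]
        simpa using slice_drop full ir
    · simp only [hl, if_pos, hr]
      rcases (PySem.List.index?_eq_some_iff full "l" il).1 hlo with ⟨preL, sufL, hfl, hlenL, hnotL⟩
      have hrp : "r" ∉ preL := fun hm => hr (by rw [hfl]; exact List.mem_append.2 (Or.inl hm))
      have hgo := go_l_first full preL sufL hnotL hrp
      rw [← hfl] at hgo
      rw [hgo, hlo]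
      simpa using slice_take full il
  · by_cases hr : "r" ∈ full
    · rcases hro : PySem.List.index? full "r" with _ | ir
      · exact absurd ((PySem.List.index?_eq_none_iff full "r").1 hro) (not_not_intro hr)
      simp only [if_neg (fun h => hl h), hr, if_pos]
      rcases (PySem.List.index?_eq_some_iff full "r" ir).1 hro with ⟨preR, sufR, hfr, hlenR, hnotR⟩
      have hlp : "l" ∉ preR := fun hm => hl (by rw [hfr]; exact List.mem_append.2 (Or.inl hm))
      have hgo := go_r_first full preR sufR hlp hnotR
      rw [← hfr] at hgo
      rw [hgo, hro]
      simpa using slice_drop full ir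
    · rw [if_neg (fun h => hl h), if_neg (fun h => hr h), go_none full full hl hr]

-- ===== VERDICT (by name: the statement is the Claim_ definition above) =====
theorem solution_spec : Claim_equal_solution := by
  intro str_list _
  unfold Spec_solution
  exact solution_eq_alt str_list
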